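-- pv_equiv track=rewrite | github.com/arnab-maity007/Algorumble_Nov_28_batch | aryan/testcases.py | solve
-- ===== SOURCE A (Python) =====
-- def solve(grid):
--     """
--     This is the O(n^2) DP solution.
--     dp[i][j] = total chants that have been applied *at or above* (i, j)
--                on the same diagonal.
--     total_answer = sum of chants we have to add at each step.
--     """
--
--     n = len(grid)
--     if n == 0:
--         return 0
--
--     dp = [[0] * n for _ in range(n)]
--     total_answer = 0
--
--     for i in range(n):
--         for j in range(n):
--             # Get chants propagated from the cell diagonally above-left
--             propagated_chants = 0
--             if i > 0 and j > 0:
--                 propagated_chants = dp[i-1][j-1]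
--
--             # This is the cell's current value after previous chants
--             current_value = grid[i][j] + propagated_chants
--
--             chants_needed = 0
--             if current_value < 0:
--                 # We must use long long here, but Python handles it.
--                 chants_needed = -current_value
--
--             # The total answer is the sum of chants we add at each step
--             total_answer += chants_needed
--
--             # The dp state for (i+1, j+1) is the sum of previous
--             # chants plus the new ones we just added at (i, j).
--             dp[i][j] = propagated_chants + chants_needed
--
--     return total_answer
-- ===== SOURCE B (Python) =====
-- def solve(grid):
--     """Diagonal-sweep reformulation: each down-right diagonal is independent,
--     so walk each diagonal once carrying a single propagated scalar."""
--     n = len(grid)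
--     if n == 0:
--         return 0
--     total = 0
--     for j in range(n):            # diagonals starting on the top row
--         propagated = 0
--         r, c = 0, j
--         while r < n and c < n:
--             current = grid[r][c] + propagated
--             need = -current if current < 0 else 0
--             total += need
--             propagated += need
--             r += 1
--             c += 1
--     for i in range(1, n):         # diagonals starting on the left column
--         propagated = 0
--         r, c = i, 0
--         while r < n and c < n:
--             current = grid[r][c] + propagated
--             need = -current if current < 0 else 0
--             total += need
--             propagated += need
--             r += 1
--             c += 1
--     return total
-- ===== Notes on version B (the rewrite author's own statement) =====
-- stated objective: alternative
-- what changed: Replaces the n-by-n dp table and row-major double loop with independent down-right diagonal sweeps, each carrying a single propagated scalar (O(1) extra memory instead of O(n^2)).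
import Mathlib
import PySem

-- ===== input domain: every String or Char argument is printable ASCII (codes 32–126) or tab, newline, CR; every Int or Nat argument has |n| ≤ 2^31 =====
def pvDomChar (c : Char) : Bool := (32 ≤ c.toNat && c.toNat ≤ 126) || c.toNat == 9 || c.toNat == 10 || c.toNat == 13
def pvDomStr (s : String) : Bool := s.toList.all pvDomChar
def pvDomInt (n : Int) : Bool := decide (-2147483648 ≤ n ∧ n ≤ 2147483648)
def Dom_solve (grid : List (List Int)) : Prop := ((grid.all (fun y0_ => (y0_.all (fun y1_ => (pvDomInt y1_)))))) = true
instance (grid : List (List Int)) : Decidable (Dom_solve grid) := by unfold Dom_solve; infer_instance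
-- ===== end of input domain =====

-- B drops A's n×n dp table: each down-right diagonal is independent, so B sweeps each
-- diagonal once carrying one propagated scalar (objective: alternative; O(1) extra space).

-- ===== PORT A =====
def solve (grid : List (List Int)) : Int :=
  let n := grid.length
  if n = 0 then 0 else
    let dp : List (List Int) := (List.range n).map (fun _ => List.replicate n 0)
    let st := (List.range n).foldl (fun st i =>
      (List.range n).foldl (fun st j =>
        let propagated : Int := if 0 < i ∧ 0 < j then (st.1.getD (i-1) []).getD (j-1) 0 else 0
        let current : Int := (grid.getD i []).getD j 0 + propagated
        let chants : Int := if current < 0 then -current else 0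
        (st.1.set i ((st.1.getD i []).set j (propagated + chants)), st.2 + chants)) st) (dp, (0:Int))
    st.2

-- ===== PORT B =====
def sweep (grid : List (List Int)) (n r c : Nat) (propagated total : Int) : Int :=
  if r < n ∧ c < n then
    let current : Int := (grid.getD r []).getD c 0 + propagated
    let need : Int := if current < 0 then -current else 0
    sweep grid n (r+1) (c+1) (propagated + need) (total + need)
  else total
termination_by n - r

def solve_alt (grid : List (List Int)) : Int :=
  let n := grid.length
  if n = 0 then 0 else
    let t1 := (List.range n).foldl (fun total j => sweep grid n 0 j 0 total) 0
    (List.range' 1 (n-1)).foldl (fun total i => sweep grid n i 0 0 total) t1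

-- ===== PRECONDITION & SPEC =====
-- Pre_: Python's grid[i][j] raises IndexError when some row is shorter than len(grid);
-- exactly those inputs are excluded (A returns normally on all others).
def Pre_solve (grid : List (List Int)) : Prop := ∀ row ∈ grid, grid.length ≤ row.length
instance (grid : List (List Int)) : Decidable (Pre_solve grid) := by unfold Pre_solve; infer_instance
def pvWitness_solve : List (List Int) := [[-2, 3], [1, -1]]
def Spec_solve (grid : List (List Int)) (out : Int) : Prop := out = solve_alt grid
instance (grid : List (List Int)) (out : Int) : Decidable (Spec_solve grid out) := by unfold Spec_solve; infer_instance

-- ===== CLAIM (what is proved, stated in full; the proofs are below) =====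
def Claim_equal_solve : Prop := ∀ (grid : List (List Int)), Dom_solve grid → Pre_solve grid → Spec_solve grid (solve grid)

-- ===== LEMMAS AND PROOFS =====

-- cell value as both ports read it
def gval (grid : List (List Int)) (r c : Nat) : Int := (grid.getD r []).getD c 0

-- propagated-after value along a diagonal
def Paft (grid : List (List Int)) : Nat → Nat → Int
  | 0, c => max 0 (-(gval grid 0 c))
  | r+1, c =>
    let p := if 0 < c then Paft grid r (c-1) else 0
    p + max 0 (-(gval grid (r+1) c + p))

def Pbef (grid : List (List Int)) (r c : Nat) : Int :=
  if 0 < r ∧ 0 < c then Paft grid (r-1) (c-1) else 0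

def needv (grid : List (List Int)) (r c : Nat) : Int :=
  max 0 (-(gval grid r c + Pbef grid r c))

lemma Paft_eq (grid : List (List Int)) (r c : Nat) :
    Paft grid r c = Pbef grid r c + needv grid r c := by
  cases r with
  | zero => simp [Paft, Pbef, needv]
  | succ r' =>
    cases c with
    | zero => simp [Paft, Pbef, needv]
    | succ c' => simp [Paft, Pbef, needv]

lemma ite_neg_eq_max (x : Int) : (if x < 0 then -x else 0) = max 0 (-x) := by
  split_ifs <;> omega

lemma sweep_spec (grid : List (List Int)) (n : Nat) :
    ∀ (m r c : Nat) (total : Int), n - r ≤ m →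
      sweep grid n r c (Pbef grid r c) total
        = total + ∑ k ∈ Finset.range (n - max r c), needv grid (r + k) (c + k) := by
  intro m
  induction m with
  | zero =>
    intro r c total hm
    have hr : ¬ (r < n ∧ c < n) := by omega
    rw [sweep, if_neg hr]
    have : n - max r c = 0 := by omega
    simp [this]
  | succ m ih =>
    intro r c total hm
    by_cases h : r < n ∧ c < n
    · rw [sweep, if_pos h]
      have hneed : (if (grid.getD r []).getD c 0 + Pbef grid r c < 0
          then -((grid.getD r []).getD c 0 + Pbef grid r c) else 0) = needv grid r c := by
        rw [ite_neg_eq_max]; rfl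
      simp only [hneed]
      have hpb : Pbef grid r c + needv grid r c = Pbef grid (r+1) (c+1) := by
        rw [← Paft_eq]; simp [Pbef]
      rw [hpb, ih (r+1) (c+1) (total + needv grid r c) (by omega)]
      have hM : n - max r c = (n - max (r+1) (c+1)) + 1 := by omega
      rw [hM, Finset.sum_range_succ']
      have harg : ∀ k, needv grid (r + (k+1)) (c + (k+1)) = needv grid (r+1+k) (c+1+k) := by
        intro k; congr 1 <;> omega
      simp only [harg, Nat.add_zero]
      ring
    · rw [sweep, if_neg h]
      have : n - max r c = 0 := by omega
      simp [this]

-- dp table contents after processing rows < i fully and row i columns < j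
def matFor (grid : List (List Int)) (n i j : Nat) : List (List Int) :=
  (List.range n).map (fun r => (List.range n).map (fun c =>
    if r < i ∨ (r = i ∧ c < j) then Paft grid r c else 0))

-- A's loop body, named for the proofs (definitionally the lambda inside `solve`)
def stepA (grid : List (List Int)) (i j : Nat) (st : List (List Int) × Int) :
    List (List Int) × Int :=
  let propagated : Int := if 0 < i ∧ 0 < j then (st.1.getD (i-1) []).getD (j-1) 0 else 0
  let current : Int := (grid.getD i []).getD j 0 + propagated
  let chants : Int := if current < 0 then -current else 0
  (st.1.set i ((st.1.getD i []).set j (propagated + chants)), st.2 + chants)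

lemma solve_eq_fold (grid : List (List Int)) :
    solve grid = (if grid.length = 0 then (0:Int) else
      ((List.range grid.length).foldl
        (fun st i => (List.range grid.length).foldl (fun st j => stepA grid i j st) st)
        ((List.range grid.length).map (fun _ => List.replicate grid.length 0), (0:Int))).2) := rfl

lemma getD_map_range {α : Type} (n i : Nat) (f : Nat → α) (d : α) (h : i < n) :
    ((List.range n).map f).getD i d = f i := by
  simp [List.getD, h]

lemma set_map_range {α : Type} (n i : Nat) (f : Nat → α) (v : α) :
    ((List.range n).map f).set i v = (List.range n).map (fun r => if r = i then v else f r) := by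
  apply List.ext_getElem
  · simp
  · intro k h1 h2
    simp only [List.getElem_set, List.getElem_map, List.getElem_range]
    by_cases hik : i = k
    · simp [hik]
    · rw [if_neg hik, if_neg (by omega : ¬ k = i)]

lemma map_range_congr {α : Type} (n : Nat) (f g : Nat → α) (h : ∀ r, r < n → f r = g r) :
    (List.range n).map f = (List.range n).map g :=
  List.map_congr_left (fun r hr => h r (List.mem_range.mp hr))

lemma matFor_zero (grid : List (List Int)) (n : Nat) :
    (List.range n).map (fun _ => List.replicate n (0:Int)) = matFor grid n 0 0 := by
  unfold matFor
  apply map_range_congr; intro r hr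
  have hrep : List.replicate n (0:Int) = (List.range n).map (fun _ => (0:Int)) := by
    rw [List.map_const', List.length_range]
  rw [hrep]
  apply map_range_congr; intro c hc
  simp

lemma matFor_row_end (grid : List (List Int)) (n i : Nat) :
    matFor grid n i n = matFor grid n (i+1) 0 := by
  unfold matFor
  apply map_range_congr; intro r hr
  apply map_range_congr; intro c hc
  have hiff : (r < i ∨ (r = i ∧ c < n)) ↔ (r < i + 1 ∨ (r = i + 1 ∧ c < 0)) := by omega
  simp only [hiff]

lemma matFor_set (grid : List (List Int)) (n i j : Nat) (hi : i < n) :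
    (matFor grid n i j).set i (((matFor grid n i j).getD i []).set j (Paft grid i j))
      = matFor grid n i (j+1) := by
  unfold matFor
  rw [getD_map_range n i _ _ hi, set_map_range, set_map_range]
  apply map_range_congr; intro r hr
  by_cases hri : r = i
  · subst hri; rw [if_pos rfl]
    apply map_range_congr; intro c hc
    by_cases hcj : c = j
    · subst hcj; rw [if_pos rfl, if_pos (Or.inr ⟨rfl, by omega⟩)]
    · rw [if_neg hcj]
      simp only [lt_self_iff_false, true_and, false_or]
      have hiff : c < j ↔ c < j + 1 := by omega
      simp only [hiff]
  · rw [if_neg hri]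
    apply map_range_congr; intro c hc
    have hiff : (r < i ∨ (r = i ∧ c < j)) ↔ (r < i ∨ (r = i ∧ c < j + 1)) := by omega
    simp only [hiff]

lemma stepA_matFor (grid : List (List Int)) (n i j : Nat) (T : Int) (hi : i < n) (hj : j < n) :
    stepA grid i j (matFor grid n i j, T) = (matFor grid n i (j+1), T + needv grid i j) := by
  have hprop : (if 0 < i ∧ 0 < j
      then ((matFor grid n i j).getD (i-1) []).getD (j-1) 0 else 0) = Pbef grid i j := by
    unfold Pbef
    by_cases h : 0 < i ∧ 0 < j
    · rw [if_pos h, if_pos h]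
      unfold matFor
      rw [getD_map_range n (i-1) _ _ (by omega), getD_map_range n (j-1) _ _ (by omega)]
      rw [if_pos (Or.inl (by omega))]
    · rw [if_neg h, if_neg h]
  unfold stepA
  simp only [hprop, ite_neg_eq_max]
  have hneed : max 0 (-((grid.getD i []).getD j 0 + Pbef grid i j)) = needv grid i j := rfl
  rw [hneed, ← Paft_eq, matFor_set grid n i j hi]

lemma innerA (grid : List (List Int)) (n i : Nat) (hi : i < n) :
    ∀ (j : Nat), j ≤ n → ∀ (T : Int),
      (List.range j).foldl (fun st j => stepA grid i j st) (matFor grid n i 0, T)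
        = (matFor grid n i j, T + ∑ c ∈ Finset.range j, needv grid i c) := by
  intro j
  induction j with
  | zero => intro _ T; simp
  | succ j ih =>
    intro hj T
    rw [List.range_succ, List.foldl_append, ih (by omega), List.foldl_cons, List.foldl_nil,
      stepA_matFor grid n i j _ hi (by omega), Finset.sum_range_succ]
    rw [add_assoc]

lemma outerA (grid : List (List Int)) (n : Nat) (hn : n = grid.length) :
    ∀ (i : Nat), i ≤ n →
      (List.range i).foldl
        (fun st i => (List.range n).foldl (fun st j => stepA grid i j st) st)
        (matFor grid n 0 0, 0)
        = (matFor grid n i 0, ∑ r ∈ Finset.range i, ∑ c ∈ Finset.range n, needv grid r c) := by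
  intro i
  induction i with
  | zero => intro _; simp
  | succ i ih =>
    intro hi
    rw [List.range_succ, List.foldl_append, ih (by omega), List.foldl_cons, List.foldl_nil,
      innerA grid n i (by omega) n (le_refl n), matFor_row_end, Finset.sum_range_succ]

lemma solve_eq_sum (grid : List (List Int)) :
    solve grid = ∑ i ∈ Finset.range grid.length, ∑ j ∈ Finset.range grid.length,
      needv grid i j := by
  rw [solve_eq_fold]
  by_cases hn : grid.length = 0
  · simp [hn]
  · rw [if_neg hn, matFor_zero grid grid.length,
      outerA grid grid.length rfl grid.length (le_refl _)]

lemma fold_range_acc (f : Nat → Int) (step : Int → Nat → Int)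
    (h : ∀ t x, step t x = t + f x) :
    ∀ (m : Nat) (T : Int), (List.range m).foldl step T = T + ∑ x ∈ Finset.range m, f x := by
  intro m
  induction m with
  | zero => intro T; simp
  | succ m ih =>
    intro T
    rw [List.range_succ, List.foldl_append, ih, List.foldl_cons, List.foldl_nil, h,
      Finset.sum_range_succ]
    ring

lemma fold_range'_acc (f : Nat → Int) (step : Int → Nat → Int)
    (h : ∀ t x, step t x = t + f x) :
    ∀ (b a : Nat) (T : Int), (List.range' a b).foldl step T = T + ∑ k ∈ Finset.range b, f (a + k) := by
  intro b
  induction b with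
  | zero => intro a T; simp
  | succ b ih =>
    intro a T
    rw [List.range'_succ, List.foldl_cons, h, ih, Finset.sum_range_succ']
    have harg : ∀ k, f (a + (k + 1)) = f (a + 1 + k) := by intro k; congr 1; omega
    simp only [harg, Nat.add_zero]
    ring

lemma reindex (n : Nat) (F : Nat → Nat → Int) :
    ∑ i ∈ Finset.range n, ∑ j ∈ Finset.range n, F i j
      = (∑ j ∈ Finset.range n, ∑ k ∈ Finset.range (n - j), F k (j + k))
        + ∑ d ∈ Finset.range (n - 1), ∑ k ∈ Finset.range (n - (1 + d)), F (1 + d + k) k := by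
  rw [← Finset.sum_product (Finset.range n) (Finset.range n) (fun p => F p.1 p.2)]
  rw [← Finset.sum_filter_add_sum_filter_not (Finset.range n ×ˢ Finset.range n)
    (fun p => p.1 ≤ p.2) (fun p => F p.1 p.2)]
  congr 1
  · rw [Finset.sum_sigma' (Finset.range n) (fun j => Finset.range (n - j)) (fun j k => F k (j + k))]
    refine Finset.sum_nbij' (fun p => ⟨p.2 - p.1, p.1⟩) (fun q => (q.2, q.1 + q.2)) ?_ ?_ ?_ ?_ ?_
    · intro a ha
      simp only [Finset.mem_filter, Finset.mem_product, Finset.mem_range] at ha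
      simp only [Finset.mem_sigma, Finset.mem_range]
      omega
    · intro a ha
      simp only [Finset.mem_sigma, Finset.mem_range] at ha
      simp only [Finset.mem_filter, Finset.mem_product, Finset.mem_range]
      omega
    · intro a ha
      simp only [Finset.mem_filter, Finset.mem_product, Finset.mem_range] at ha
      simp only [Prod.ext_iff]
      exact ⟨trivial, by omega⟩
    · intro a ha
      simp only [Finset.mem_sigma, Finset.mem_range] at ha
      simp only [Sigma.ext_iff]
      constructor
      · omega
      · simp
    · intro a ha
      simp only [Finset.mem_filter, Finset.mem_product, Finset.mem_range] at ha
      have : a.2 - a.1 + a.1 = a.2 := by omega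
      simp [this]
  · rw [Finset.sum_sigma' (Finset.range (n - 1)) (fun d => Finset.range (n - (1 + d)))
      (fun d k => F (1 + d + k) k)]
    refine Finset.sum_nbij' (fun p => ⟨p.1 - p.2 - 1, p.2⟩) (fun q => (1 + q.1 + q.2, q.2)) ?_ ?_ ?_ ?_ ?_
    · intro a ha
      simp only [Finset.mem_filter, Finset.mem_product, Finset.mem_range] at ha
      simp only [Finset.mem_sigma, Finset.mem_range]
      omega
    · intro a ha
      simp only [Finset.mem_sigma, Finset.mem_range] at ha
      simp only [Finset.mem_filter, Finset.mem_product, Finset.mem_range]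
      omega
    · intro a ha
      simp only [Finset.mem_filter, Finset.mem_product, Finset.mem_range] at ha
      simp only [Prod.ext_iff]
      exact ⟨by omega, trivial⟩
    · intro a ha
      simp only [Finset.mem_sigma, Finset.mem_range] at ha
      simp only [Sigma.ext_iff]
      constructor
      · omega
      · simp
    · intro a ha
      simp only [Finset.mem_filter, Finset.mem_product, Finset.mem_range] at ha
      have : 1 + (a.1 - a.2 - 1) + a.2 = a.1 := by omega
      simp [this]

lemma solve_alt_eq_sum (grid : List (List Int)) :
    solve_alt grid = ∑ i ∈ Finset.range grid.length, ∑ j ∈ Finset.range grid.length,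
      needv grid i j := by
  unfold solve_alt
  by_cases hn : grid.length = 0
  · simp [hn]
  · simp only [hn]
    set n := grid.length with hn'
    have h1 : ∀ (t : Int) (j : Nat), (fun total j => sweep grid n 0 j 0 total) t j
        = t + ∑ k ∈ Finset.range (n - j), needv grid (0 + k) (j + k) := by
      intro t j
      have hp : (0 : Int) = Pbef grid 0 j := by simp [Pbef]
      simp only [hp]
      rw [sweep_spec grid n n 0 j t (by omega)]
      simp
    have h2 : ∀ (t : Int) (i : Nat), (fun total i => sweep grid n i 0 0 total) t i
        = t + ∑ k ∈ Finset.range (n - i), needv grid (i + k) (0 + k) := by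
      intro t i
      have hp : (0 : Int) = Pbef grid i 0 := by simp [Pbef]
      simp only [hp]
      rw [sweep_spec grid n n i 0 t (by omega)]
      simp
    rw [fold_range_acc _ _ h1, fold_range'_acc _ _ h2]
    rw [reindex n (fun i j => needv grid i j)]
    simp

-- ===== VERDICT (by name: the statement is the Claim_ definition above) =====
theorem solve_spec : Claim_equal_solve := by
  intro grid _ _
  unfold Spec_solve
  rw [solve_eq_sum, solve_alt_eq_sum]
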